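-- pv_equiv track=rewrite | github.com/jahir-raihan/solved_problems_from_different_platforms | solved_in_mobile/medium problem.py | has22
-- ===== SOURCE A (Python) =====
-- def has22(l):
-- 		result =[]
-- 		for i in range(len(l)):
-- 			try:
-- 				if l[i] ==2 and l[i+1]==2:
-- 					result.append('found')
-- 			except IndexError:
-- 				pass
-- 			else:
-- 				result.append('Not found')
-- 		def retu():
-- 				if 'found' in result:
-- 					return True
-- 				else:
-- 					return False
--
-- 		return retu()
-- ===== SOURCE B (Python) =====
-- def has22(l):
--     idx = [i for i, x in enumerate(l) if x == 2]
--     return any(b - a == 1 for a, b in zip(idx, idx[1:]))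
-- ===== Notes on version B (the rewrite author's own statement) =====
-- stated objective: idiomatic
-- what changed: Replaces A's index loop with try/except and a result-string accumulator by a two-stage decomposition: first collect the positions of all 2s, then check whether any two recorded positions are adjacent.
import Mathlib
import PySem

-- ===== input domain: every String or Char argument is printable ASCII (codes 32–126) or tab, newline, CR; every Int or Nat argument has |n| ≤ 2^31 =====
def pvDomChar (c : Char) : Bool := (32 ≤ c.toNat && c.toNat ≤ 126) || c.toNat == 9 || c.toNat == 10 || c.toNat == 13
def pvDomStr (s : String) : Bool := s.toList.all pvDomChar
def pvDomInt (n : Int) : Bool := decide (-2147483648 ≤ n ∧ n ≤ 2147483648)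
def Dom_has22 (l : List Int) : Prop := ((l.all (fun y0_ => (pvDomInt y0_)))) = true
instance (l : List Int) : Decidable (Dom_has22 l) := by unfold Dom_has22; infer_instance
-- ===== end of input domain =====

-- B collects the positions of all 2s first and then checks whether two recorded positions are
-- adjacent, instead of A's pair-scanning loop with try/except and a result-string accumulator.

-- ===== PORT A =====
-- loop body of A: the try/except/else around `if l[i]==2 and l[i+1]==2` (IndexError → pass;
-- `and` short-circuits, so l[i+1] is only read when l[i]==2; the else-branch appends 'Not found')
def has22Step (l : List Int) (res : List String) (i : Int) : List String :=
  match PySem.List.pyGet? l i with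
  | none => res
  | some a =>
    if a == 2 then
      match PySem.List.pyGet? l (i + 1) with
      | none => res
      | some b => (if b == 2 then res ++ ["found"] else res) ++ ["Not found"]
    else res ++ ["Not found"]

def has22 (l : List Int) : Bool :=
  let result := (PySem.List.pyRange 0 (l.length : Int) 1).foldl (has22Step l) []
  -- retu(): if 'found' in result then True else False
  if result.contains "found" then true else false

-- ===== PORT B =====
def has22_alt (l : List Int) : Bool :=
  let idx : List Int :=
    (PySem.List.enumerate l).filterMap (fun p => if p.2 == 2 then some p.1 else none)
  (idx.zip (idx.drop 1)).any (fun p => p.2 - p.1 == 1)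

-- ===== PRECONDITION & SPEC =====
def Spec_has22 (l : List Int) (out : Bool) : Prop := out = has22_alt l
instance (l : List Int) (out : Bool) : Decidable (Spec_has22 l out) := by unfold Spec_has22; infer_instance

-- ===== CLAIM (what is proved, stated in full; the proofs are below) =====
def Claim_equal_has22 : Prop := ∀ (l : List Int), Dom_has22 l → Spec_has22 l (has22 l)

-- ===== LEMMAS AND PROOFS =====

-- reference predicate: some adjacent pair of 2s
def adjB : List Int → Bool
  | a :: b :: t => (a == 2 && b == 2) || adjB (b :: t)
  | _ => false

-- proof-side names for B's two stages
def idxOf (l : List Int) (s : Int) : List Int :=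
  (PySem.List.enumerate l s).filterMap (fun p => if p.2 == 2 then some p.1 else none)

def zipAny (xs : List Int) : Bool := (xs.zip (xs.drop 1)).any (fun p => p.2 - p.1 == 1)

lemma has22_alt_eq (l : List Int) : has22_alt l = zipAny (idxOf l 0) := rfl

lemma idxOf_nil (s : Int) : idxOf [] s = [] := rfl

lemma idxOf_cons (x : Int) (t : List Int) (s : Int) :
    idxOf (x :: t) s = if x == 2 then s :: idxOf t (s + 1) else idxOf t (s + 1) := by
  simp only [idxOf, PySem.List.enumerate_cons, List.filterMap_cons]
  split_ifs with h <;> simp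

lemma idxOf_lb (l : List Int) (s j : Int) (hj : j ∈ idxOf l s) : s ≤ j := by
  induction l generalizing s with
  | nil => simp [idxOf_nil] at hj
  | cons x t ih =>
    rw [idxOf_cons] at hj
    split_ifs at hj with h
    · rcases List.mem_cons.mp hj with rfl | hj
      · exact le_refl _
      · have := ih (s + 1) hj; omega
    · have := ih (s + 1) hj; omega

lemma zipAny_cons_cons (a b : Int) (r : List Int) :
    zipAny (a :: b :: r) = ((b - a == 1) || zipAny (b :: r)) := by
  simp [zipAny, List.zip]

lemma zipAny_idxOf (l : List Int) (s : Int) : zipAny (idxOf l s) = adjB l := by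
  induction l generalizing s with
  | nil => rfl
  | cons x t ih =>
    rw [idxOf_cons]
    by_cases hx : x == 2
    · simp only [hx, if_true]
      match t, ih with
      | [], _ => rfl
      | y :: t', ih =>
        by_cases hy : y == 2
        · rw [idxOf_cons, if_pos hy, zipAny_cons_cons]
          simp [adjB, hx, hy]
        · rw [idxOf_cons, if_neg hy]
          have hlb : ∀ j ∈ idxOf t' (s + 1 + 1), s + 1 + 1 ≤ j := idxOf_lb t' (s + 1 + 1)
          have hrec := ih (s + 1)
          rw [idxOf_cons, if_neg hy] at hrec
          cases hr : idxOf t' (s + 1 + 1) with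
          | nil => simp [zipAny, adjB, hy, ← hrec, hr]
          | cons b r =>
            have hb : s + 1 + 1 ≤ b := hlb b (by rw [hr]; exact List.mem_cons_self)
            rw [zipAny_cons_cons]
            have hne : (b - s == 1) = false := by simp; omega
            rw [hne, Bool.false_or, ← hr, hrec]
            simp [adjB, hy]
    · rw [if_neg hx, ih (s + 1)]
      match t with
      | [] => rfl
      | y :: t' => simp [adjB, hx]

-- A-side: membership of 'found' in the accumulated result list
lemma found_mem_step (l : List Int) (res : List String) (i : Int) :
    ("found" ∈ has22Step l res i) ↔
      ("found" ∈ res ∨ (PySem.List.pyGet? l i = some 2 ∧ PySem.List.pyGet? l (i + 1) = some 2)) := by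
  unfold has22Step
  cases hA : PySem.List.pyGet? l i with
  | none => simp
  | some a =>
    by_cases ha : a == 2
    · cases hB : PySem.List.pyGet? l (i + 1) with
      | none => simp [ha]
      | some b =>
        by_cases hb : b == 2
        · simp_all
        · simp_all
    · simp_all

lemma found_mem_foldl (l : List Int) (is : List Int) (res : List String) :
    ("found" ∈ is.foldl (has22Step l) res) ↔
      ("found" ∈ res ∨ ∃ i ∈ is,
        PySem.List.pyGet? l i = some 2 ∧ PySem.List.pyGet? l (i + 1) = some 2) := by
  induction is generalizing res with
  | nil => simp
  | cons i is ih =>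
    rw [List.foldl_cons, ih, found_mem_step]
    constructor
    · rintro ((h | h) | h)
      · exact Or.inl h
      · exact Or.inr ⟨i, List.mem_cons_self, h⟩
      · rcases h with ⟨j, hj, hc⟩; exact Or.inr ⟨j, List.mem_cons_of_mem _ hj, hc⟩
    · rintro (h | ⟨j, hj, hc⟩)
      · exact Or.inl (Or.inl h)
      · rcases List.mem_cons.mp hj with rfl | hj
        · exact Or.inl (Or.inr hc)
        · exact Or.inr ⟨j, hj, hc⟩

-- nat-index existential characterisation of adjB
lemma adjB_iff (l : List Int) :
    (adjB l = true) ↔ ∃ k : Nat, l[k]? = some 2 ∧ l[k + 1]? = some 2 := by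
  induction l with
  | nil => simp [adjB]
  | cons a t ih =>
    match t, ih with
    | [], _ =>
      constructor
      · intro h; simp [adjB] at h
      · rintro ⟨k, h1, h2⟩
        rcases k with _ | k <;> simp at h2
    | b :: t', ih =>
      have hun : adjB (a :: b :: t') = ((a == 2 && b == 2) || adjB (b :: t')) := rfl
      rw [hun, Bool.or_eq_true]
      constructor
      · rintro (h | h)
        · exact ⟨0, by simp_all, by simp_all⟩
        · rcases (ih.mp h) with ⟨k, h1, h2⟩
          exact ⟨k + 1, by simpa using h1, by simpa using h2⟩
      · rintro ⟨k, h1, h2⟩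
        rcases k with _ | k
        · left; simp_all
        · right
          exact ih.mpr ⟨k, by simpa using h1, by simpa using h2⟩

lemma has22_eq_adjB (l : List Int) : has22 l = adjB l := by
  have hmem : ((PySem.List.pyRange 0 (l.length : Int) 1).foldl (has22Step l) []).contains "found"
      = adjB l := by
    rw [Bool.eq_iff_iff, List.contains_iff_mem, found_mem_foldl, adjB_iff]
    constructor
    · rintro (h | ⟨i, hi, h1, h2⟩)
      · simp at h
      · have hi' := (PySem.List.mem_pyRange_one).mp hi
        refine ⟨i.toNat, ?_, ?_⟩
        · rw [PySem.List.pyGet?_of_nonneg l (by omega)] at h1; exact h1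
        · rw [PySem.List.pyGet?_of_nonneg l (by omega)] at h2
          have : (i + 1).toNat = i.toNat + 1 := by omega
          rwa [this] at h2
    · rintro ⟨k, h1, h2⟩
      have hk : k < l.length := by
        by_contra hk
        rw [List.getElem?_eq_none (by omega)] at h1; simp at h1
      refine Or.inr ⟨(k : Int), (PySem.List.mem_pyRange_one).mpr ⟨by omega, by exact_mod_cast hk⟩, ?_, ?_⟩
      · rw [PySem.List.pyGet?_natCast l k]; exact h1
      · have : ((k : Int) + 1) = ((k + 1 : Nat) : Int) := by push_cast; ring
        rw [this, PySem.List.pyGet?_natCast l (k+1)]; exact h2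
  show (if _ then true else false) = _
  rw [hmem]
  cases adjB l <;> rfl

-- ===== VERDICT (by name: the statement is the Claim_ definition above) =====
theorem has22_spec : Claim_equal_has22 := by
  intro l _
  show has22 l = has22_alt l
  rw [has22_alt_eq, zipAny_idxOf, has22_eq_adjB]
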